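-- pv_equiv track=rewrite | github.com/csv610/CompGeom | src/trianglemesh/walks.py | generate_zigzag_path
-- ===== SOURCE A (Python) =====
-- def generate_zigzag_path(width, height):
--     path = []
--     for diagonal in range(width + height - 1):
--         if diagonal % 2 == 0:
--             y = min(diagonal, height - 1)
--             x = diagonal - y
--             while y >= 0 and x < width:
--                 path.append((x, y))
--                 y -= 1
--                 x += 1
--         else:
--             x = min(diagonal, width - 1)
--             y = diagonal - x
--             while x >= 0 and y < height:
--                 path.append((x, y))
--                 x -= 1
--                 y += 1
--     return path
-- ===== SOURCE B (Python) =====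
-- def generate_zigzag_path(width, height):
--     # Bucket the grid cells by diagonal d = x + y (each bucket is built in
--     # increasing-x order), then flatten: even diagonals as-is, odd reversed.
--     buckets = {}
--     for x in range(width):
--         for y in range(height):
--             buckets.setdefault(x + y, []).append((x, y))
--     path = []
--     for d in range(width + height - 1):
--         b = buckets.get(d, [])
--         path += b if d % 2 == 0 else b[::-1]
--     return path
-- ===== Notes on version B (the rewrite author's own statement) =====
-- stated objective: alternative
-- what changed: A walks each diagonal cell-by-cell with parity-dependent start points and while-loops; B instead buckets all grid cells by diagonal index d = x + y in one x-major pass over the grid and then flattens the buckets, reversing the odd ones.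
import Mathlib
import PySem

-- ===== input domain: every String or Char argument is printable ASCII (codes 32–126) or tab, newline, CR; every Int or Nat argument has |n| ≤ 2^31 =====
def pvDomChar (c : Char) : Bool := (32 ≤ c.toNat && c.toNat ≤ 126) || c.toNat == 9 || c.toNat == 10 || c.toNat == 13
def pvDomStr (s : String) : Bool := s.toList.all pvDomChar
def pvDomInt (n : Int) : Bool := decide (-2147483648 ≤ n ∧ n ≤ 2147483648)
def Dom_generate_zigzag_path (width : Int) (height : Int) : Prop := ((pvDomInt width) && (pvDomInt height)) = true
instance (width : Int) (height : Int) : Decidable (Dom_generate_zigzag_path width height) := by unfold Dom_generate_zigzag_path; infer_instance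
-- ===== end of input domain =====

-- B replaces A's per-diagonal coordinate walks by one bucketing pass over the grid
-- (buckets keyed by the diagonal d = x + y) followed by a flatten; same cost, different decomposition.

-- ===== PORT A =====
-- the even-diagonal while loop: 'while y >= 0 and x < width: append (x,y); y -= 1; x += 1'
def pvWalkEven (w : Int) (x y : Int) (acc : List (Int × Int)) : List (Int × Int) :=
  if 0 ≤ y ∧ x < w then pvWalkEven w (x + 1) (y - 1) (acc ++ [(x, y)]) else acc
termination_by (y + 1).toNat
decreasing_by omega

-- the odd-diagonal while loop: 'while x >= 0 and y < height: append (x,y); x -= 1; y += 1'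
def pvWalkOdd (hgt : Int) (x y : Int) (acc : List (Int × Int)) : List (Int × Int) :=
  if 0 ≤ x ∧ y < hgt then pvWalkOdd hgt (x - 1) (y + 1) (acc ++ [(x, y)]) else acc
termination_by (x + 1).toNat
decreasing_by omega

def generate_zigzag_path (width : Int) (height : Int) : List (Int × Int) :=
  (PySem.List.pyRange 0 (width + height - 1) 1).foldl
    (fun path diagonal =>
      if PySem.Int.mod diagonal 2 == 0 then
        let y := min diagonal (height - 1)
        let x := diagonal - y
        pvWalkEven width x y path
      else
        let x := min diagonal (width - 1)
        let y := diagonal - x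
        pvWalkOdd height x y path)
    []

-- ===== PORT B =====
-- 'buckets.setdefault(x + y, []).append((x, y))' = Dict.modify (x+y) [] (· ++ [(x,y)])
-- 'b[::-1]' is ported as List.reverse (exact: PySem.List.slice?_none_none_neg_one)
def generate_zigzag_path_alt (width : Int) (height : Int) : List (Int × Int) :=
  let buckets : PySem.Dict Int (List (Int × Int)) :=
    (PySem.List.pyRange 0 width 1).foldl
      (fun bs x =>
        (PySem.List.pyRange 0 height 1).foldl
          (fun bs y => bs.modify (x + y) [] (fun b => b ++ [(x, y)])) bs)
      PySem.Dict.empty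
  (PySem.List.pyRange 0 (width + height - 1) 1).foldl
    (fun path d =>
      let b := buckets.getD d []
      path ++ (if PySem.Int.mod d 2 == 0 then b else b.reverse))
    []

-- ===== PRECONDITION & SPEC =====
def Spec_generate_zigzag_path (width : Int) (height : Int) (out : List (Int × Int)) : Prop := out = generate_zigzag_path_alt width height
instance (width : Int) (height : Int) (out : List (Int × Int)) : Decidable (Spec_generate_zigzag_path width height out) := by unfold Spec_generate_zigzag_path; infer_instance

-- ===== CLAIM (what is proved, stated in full; the proofs are below) =====
def Claim_equal_generate_zigzag_path : Prop := ∀ (width : Int) (height : Int), Dom_generate_zigzag_path width height → Spec_generate_zigzag_path width height (generate_zigzag_path width height)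

-- ===== LEMMAS AND PROOFS =====

-- the diagonal d of a w × h grid, in increasing-x order
def pvDiag (w h d : Int) : List (Int × Int) :=
  (PySem.List.pyRange (max 0 (d - h + 1)) (min d (w - 1) + 1) 1).map (fun t => (t, d - t))

theorem pvWalkEven_eq (w : Int) : ∀ (x y : Int) (acc : List (Int × Int)),
    pvWalkEven w x y acc =
      acc ++ (PySem.List.pyRange x (min (x + y) (w - 1) + 1) 1).map (fun t => (t, x + y - t)) := by
  intro x y acc
  induction x, y, acc using pvWalkEven.induct w with
  | case1 x y acc h ih =>
    rw [pvWalkEven, if_pos h, ih,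
      PySem.List.pyRange_one_cons (a := x) (b := min (x + y) (w - 1) + 1) (by omega)]
    simp
  | case2 x y acc h =>
    rw [pvWalkEven, if_neg h, PySem.List.pyRange_one_eq_nil (by omega)]
    simp

theorem pvWalkOdd_eq (hgt : Int) : ∀ (x y : Int) (acc : List (Int × Int)),
    pvWalkOdd hgt x y acc =
      acc ++ ((PySem.List.pyRange (max 0 (x + y - hgt + 1)) (x + 1) 1).map
        (fun t => (t, x + y - t))).reverse := by
  intro x y acc
  induction x, y, acc using pvWalkOdd.induct hgt with
  | case1 x y acc h ih =>
    rw [pvWalkOdd, if_pos h, ih,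
      PySem.List.pyRange_one_succ_right (a := max 0 (x + y - hgt + 1)) (b := x) (by omega)]
    simp
  | case2 x y acc h =>
    rw [pvWalkOdd, if_neg h, PySem.List.pyRange_one_eq_nil (by omega)]
    simp

-- flatMap of an if-singleton is a filter-then-map
theorem pvFlatMap_ite {α β : Type} (l : List α) (p : α → Prop) [DecidablePred p] (f : α → β) :
    l.flatMap (fun a => if p a then [f a] else []) = (l.filter (fun a => decide (p a))).map f := by
  induction l with
  | nil => rfl
  | cons a t ih =>
    by_cases h : p a <;> simp [List.flatMap_cons, h, ih]

-- filtering an increasing int range by an interval predicate yields the subrange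
theorem pvFilter_pyRange (a b lo hi : Int) :
    (PySem.List.pyRange a b 1).filter (fun t => decide (lo ≤ t ∧ t ≤ hi)) =
      PySem.List.pyRange (max a lo) (min b (hi + 1)) 1 := by
  by_cases hne : max a lo < min b (hi + 1)
  · rw [PySem.List.pyRange_one_append a (max a lo) b (by omega) (by omega),
      PySem.List.pyRange_one_append (max a lo) (min b (hi + 1)) b (by omega) (by omega)]
    rw [List.filter_append, List.filter_append]
    rw [List.filter_eq_nil_iff.mpr (by
      intro t ht
      rw [PySem.List.mem_pyRange_one] at ht
      simp only [decide_eq_true_eq, not_and, not_le]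
      omega)]
    rw [List.filter_eq_self.mpr (by
      intro t ht
      rw [PySem.List.mem_pyRange_one] at ht
      simp only [decide_eq_true_eq]
      omega)]
    rw [List.filter_eq_nil_iff.mpr (by
      intro t ht
      rw [PySem.List.mem_pyRange_one] at ht
      simp only [decide_eq_true_eq, not_and, not_le]
      omega)]
    simp
  · rw [PySem.List.pyRange_one_eq_nil (a := max a lo) (b := min b (hi + 1)) (by omega)]
    apply List.filter_eq_nil_iff.mpr
    intro t ht
    rw [PySem.List.mem_pyRange_one] at ht
    simp only [decide_eq_true_eq, not_and, not_le]
    omega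

-- nested foldl over a grid = foldl over the flattened cell list
theorem pvFoldl_nested {α β γ : Type} (l : List α) (g : α → List β) (f : γ → β → γ) (init : γ) :
    l.foldl (fun acc a => (g a).foldl f acc) init = (l.flatMap g).foldl f init := by
  induction l generalizing init with
  | nil => rfl
  | cons a t ih => simp [List.flatMap_cons, List.foldl_append, ih]

-- B's bucket for key d holds exactly the diagonal d (in increasing-x order)
theorem pvBucket_eq (width height d : Int) :
    ((PySem.List.pyRange 0 width 1).foldl
      (fun bs x =>
        (PySem.List.pyRange 0 height 1).foldl
          (fun bs y => bs.modify (x + y) [] (fun b => b ++ [(x, y)])) bs)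
      (PySem.Dict.empty : PySem.Dict Int (List (Int × Int)))).getD d []
    = pvDiag width height d := by
  have hinner : ∀ (x : Int) (bs : PySem.Dict Int (List (Int × Int))),
      (PySem.List.pyRange 0 height 1).foldl
        (fun bs y => bs.modify (x + y) [] (fun b => b ++ [(x, y)])) bs
      = ((PySem.List.pyRange 0 height 1).map (fun y => ((x + y : Int), ((x, y) : Int × Int)))).foldl
          (fun bs p => bs.modify p.1 [] (fun b => b ++ [p.2])) bs := by
    intro x bs
    rw [List.foldl_map]
  have hfold := PySem.List.foldl_congr_mem
    (l := PySem.List.pyRange 0 width 1)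
    (init := (PySem.Dict.empty : PySem.Dict Int (List (Int × Int))))
    (f := fun bs x =>
      (PySem.List.pyRange 0 height 1).foldl
        (fun bs y => bs.modify (x + y) [] (fun b => b ++ [(x, y)])) bs)
    (g := fun bs x =>
      ((PySem.List.pyRange 0 height 1).map (fun y => ((x + y : Int), ((x, y) : Int × Int)))).foldl
        (fun bs p => bs.modify p.1 [] (fun b => b ++ [p.2])) bs)
    (fun bs x _ => hinner x bs)
  rw [hfold, pvFoldl_nested, PySem.Dict.getD_foldl_modify_append, PySem.Dict.getD_empty,
    List.filter_flatMap, List.map_flatMap]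
  have hcell : ∀ x : Int,
      ((((PySem.List.pyRange 0 height 1).map (fun y => ((x + y : Int), ((x, y) : Int × Int)))).filter
        (fun p => p.1 == d)).map (·.2))
      = if 0 ≤ d - x ∧ d - x < height then [((x : Int), (d - x : Int))] else [] := by
    intro x
    rw [List.filter_map, List.map_map]
    by_cases hc : 0 ≤ d - x ∧ d - x < height
    · rw [if_pos hc]
      rw [PySem.List.pyRange_one_append 0 (d - x) height (by omega) (by omega),
        PySem.List.pyRange_one_cons (a := d - x) (b := height) (by omega)]
      simp only [List.filter_append, List.filter_cons]
      rw [List.filter_eq_nil_iff.mpr (by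
        intro t ht
        rw [PySem.List.mem_pyRange_one] at ht
        simp only [Function.comp_apply, beq_iff_eq]
        omega)]
      rw [List.filter_eq_nil_iff.mpr (by
        intro t ht
        rw [PySem.List.mem_pyRange_one] at ht
        simp only [Function.comp_apply, beq_iff_eq]
        omega)]
      simp only [Function.comp_apply, beq_iff_eq]
      rw [if_pos (by omega)]
      simp
    · rw [if_neg hc]
      rw [List.filter_eq_nil_iff.mpr (by
        intro t ht
        rw [PySem.List.mem_pyRange_one] at ht
        simp only [Function.comp_apply, beq_iff_eq]
        omega)]
      simp
  simp only [hcell]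
  rw [pvFlatMap_ite (p := fun x => 0 ≤ d - x ∧ d - x < height) (f := fun x => ((x : Int), d - x))]
  rw [List.filter_congr (q := fun t => decide (d - height + 1 ≤ t ∧ t ≤ d))
    (by intro t _; simp only [decide_eq_decide]; omega)]
  rw [pvFilter_pyRange]
  unfold pvDiag
  have h2 : min width (d + 1) = min d (width - 1) + 1 := by omega
  rw [h2]
  simp

-- A's fold, with each while-loop walk replaced by the named diagonal
theorem pvA_eq (w h : Int) :
    generate_zigzag_path w h =
      (PySem.List.pyRange 0 (w + h - 1) 1).foldl
        (fun path d =>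
          path ++ (if PySem.Int.mod d 2 == 0 then pvDiag w h d else (pvDiag w h d).reverse)) [] := by
  unfold generate_zigzag_path
  apply PySem.List.foldl_congr_mem
  intro path d hdmem
  rw [PySem.List.mem_pyRange_one] at hdmem
  show (if PySem.Int.mod d 2 == 0 then
          pvWalkEven w (d - min d (h - 1)) (min d (h - 1)) path
        else
          pvWalkOdd h (min d (w - 1)) (d - min d (w - 1)) path)
      = path ++ (if PySem.Int.mod d 2 == 0 then pvDiag w h d else (pvDiag w h d).reverse)
  by_cases hp : PySem.Int.mod d 2 == 0
  · rw [if_pos hp, if_pos hp, pvWalkEven_eq]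
    unfold pvDiag
    have h2 : d - min d (h - 1) + min d (h - 1) = d := by omega
    rw [h2]
    have h3 : d - min d (h - 1) = max 0 (d - h + 1) := by omega
    rw [h3]
  · rw [if_neg hp, if_neg hp, pvWalkOdd_eq]
    unfold pvDiag
    have h2 : min d (w - 1) + (d - min d (w - 1)) = d := by omega
    rw [h2]

-- B's fold, with each bucket lookup replaced by the named diagonal
theorem pvB_eq (w h : Int) :
    generate_zigzag_path_alt w h =
      (PySem.List.pyRange 0 (w + h - 1) 1).foldl
        (fun path d =>
          path ++ (if PySem.Int.mod d 2 == 0 then pvDiag w h d else (pvDiag w h d).reverse)) [] := by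
  unfold generate_zigzag_path_alt
  apply PySem.List.foldl_congr_mem
  intro path d _hdmem
  show path ++ (if PySem.Int.mod d 2 == 0 then
          ((PySem.List.pyRange 0 w 1).foldl
            (fun bs x =>
              (PySem.List.pyRange 0 h 1).foldl
                (fun bs y => bs.modify (x + y) [] (fun b => b ++ [(x, y)])) bs)
            PySem.Dict.empty).getD d []
        else
          (((PySem.List.pyRange 0 w 1).foldl
            (fun bs x =>
              (PySem.List.pyRange 0 h 1).foldl
                (fun bs y => bs.modify (x + y) [] (fun b => b ++ [(x, y)])) bs)
            PySem.Dict.empty).getD d []).reverse)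
      = path ++ (if PySem.Int.mod d 2 == 0 then pvDiag w h d else (pvDiag w h d).reverse)
  rw [pvBucket_eq w h d]

-- ===== VERDICT (by name: the statement is the Claim_ definition above) =====
theorem generate_zigzag_path_spec : Claim_equal_generate_zigzag_path := by
  intro width height _hdom
  unfold Spec_generate_zigzag_path
  rw [pvA_eq, pvB_eq]
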